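-- pv_equiv track=rewrite | github.com/postech-db-lab-starlab/Web-Crawler-for-NL2SQL | web_crawler.py | extract_end
-- ===== SOURCE A (Python) =====
-- def extract_end(text, sql):
--     sql = sql.strip()
--     if len(sql) == 0: return 1
--     i, idx, spaces = 0, 0, [' ', '\n', '\r']
--     for space in spaces:
--         sql = sql.replace(space, '')
--     while i < len(sql):
--         if len(text) <= idx: break
--         if text[idx] not in spaces: i += 1
--         idx += 1
--     return idx + 1
-- ===== SOURCE B (Python) =====
-- def extract_end(text, sql):
--     # precompute-then-index: count non-space sql chars, list non-space text indices
--     spaces = (' ', '\n', '\r')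
--     stripped = sql.strip()
--     if len(stripped) == 0:
--         return 1
--     n = sum(1 for c in stripped if c not in spaces)
--     positions = [j for j, c in enumerate(text) if c not in spaces]
--     if n <= len(positions):
--         return positions[n - 1] + 2
--     return len(text) + 1
-- ===== Notes on version B (the rewrite author's own statement) =====
-- stated objective: alternative
-- what changed: Replaces the dual-counter walk-and-break while loop (over an sql copied three times by str.replace) with counting non-space sql chars and direct indexing into a precomputed list of non-space text indices.
import Mathlib
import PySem

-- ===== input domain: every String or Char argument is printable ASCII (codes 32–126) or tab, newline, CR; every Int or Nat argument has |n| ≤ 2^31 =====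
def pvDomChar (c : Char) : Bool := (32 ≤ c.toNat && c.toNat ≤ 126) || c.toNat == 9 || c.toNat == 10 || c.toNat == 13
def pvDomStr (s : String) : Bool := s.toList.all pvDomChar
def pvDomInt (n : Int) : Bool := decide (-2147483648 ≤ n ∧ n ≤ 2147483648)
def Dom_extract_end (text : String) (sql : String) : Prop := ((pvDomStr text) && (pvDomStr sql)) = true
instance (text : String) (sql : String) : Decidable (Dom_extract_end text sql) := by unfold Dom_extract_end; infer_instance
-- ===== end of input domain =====

-- B replaces A's dual-counter walk-and-break loop (and triple str.replace) by a count of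
-- non-space sql chars plus direct indexing into a precomputed list of non-space text indices.

-- ===== PORT A =====
def pvSpacesA : List Char := [' ', '\n', '\r']

-- A's while loop: i counts matched non-space chars, idx walks text; text[idx] is only read
-- under the guard idx < len(text), so getD is exact there.
def pvLoopA (t : List Char) (n i idx : Nat) : Nat :=
  if i < n then
    if t.length ≤ idx then idx
    else pvLoopA t n (if pvSpacesA.contains (t.getD idx ' ') then i else i + 1) (idx + 1)
  else idx
termination_by t.length - idx
decreasing_by omega

def extract_end (text : String) (sql : String) : Int :=
  let s := PySem.Str.strip sql
  if PySem.Str.len s = 0 then 1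
  else
    let s2 := pvSpacesA.foldl (fun acc sp => PySem.Chars.replace acc [sp] []) s.toList
    (pvLoopA text.toList s2.length 0 0 : Int) + 1

-- ===== PORT B =====
def pvSpacesB : List Char := [' ', '\n', '\r']

def extract_end_alt (text : String) (sql : String) : Int :=
  let stripped := PySem.Str.strip sql
  if PySem.Str.len stripped = 0 then 1
  else
    let n := ((stripped.toList).filter (fun c => !pvSpacesB.contains c)).length
    let positions := ((PySem.List.enumerate text.toList 0).filter
        (fun p => !pvSpacesB.contains p.2)).map (·.1)
    -- positions[n-1]: in range since 1 ≤ n ≤ positions.length under the guard, so getD is exact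
    if n ≤ positions.length then positions.getD (n - 1) 0 + 2
    else (PySem.Str.len text : Int) + 1

-- ===== PRECONDITION & SPEC =====
def Spec_extract_end (text : String) (sql : String) (out : Int) : Prop := out = extract_end_alt text sql
instance (text : String) (sql : String) (out : Int) : Decidable (Spec_extract_end text sql out) := by unfold Spec_extract_end; infer_instance

-- ===== CLAIM (what is proved, stated in full; the proofs are below) =====
def Claim_equal_extract_end : Prop := ∀ (text : String) (sql : String), Dom_extract_end text sql → Spec_extract_end text sql (extract_end text sql)

-- ===== LEMMAS AND PROOFS =====

-- replace with a single-char pattern and empty replacement is a filter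
lemma pv_replace_go_single (c : Char) :
    ∀ (fuel : Nat) (l acc : List Char), l.length ≤ fuel →
      PySem.Chars.replace.go [c] [] fuel l acc = acc.reverse ++ l.filter (· ≠ c) := by
  intro fuel
  induction fuel with
  | zero =>
    intro l acc h
    have : l = [] := List.eq_nil_of_length_eq_zero (Nat.le_zero.mp h)
    subst this; simp [PySem.Chars.replace.go]
  | succ m ih =>
    intro l acc h
    cases l with
    | nil => simp [PySem.Chars.replace.go]
    | cons d t =>
      by_cases hd : c = d
      · subst hd
        have : [c].isPrefixOf (c :: t) = true := by simp [List.isPrefixOf]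
        simp only [PySem.Chars.replace.go, this, if_pos, List.length_cons,
          List.length_nil, List.drop_succ_cons, List.drop_zero, List.reverse_nil,
          List.nil_append]
        rw [ih t acc (by simpa using Nat.le_of_succ_le_succ h)]
        simp
      · have : [c].isPrefixOf (d :: t) = false := by
          simp [List.isPrefixOf]; exact hd
        simp only [PySem.Chars.replace.go, this]
        rw [if_neg (by simp), ih t _ (by simpa using Nat.le_of_succ_le_succ h)]
        simp [Ne.symm hd]

lemma pv_replace_single (c : Char) (l : List Char) :
    PySem.Chars.replace l [c] [] = l.filter (· ≠ c) := by
  simpa [PySem.Chars.replace] using pv_replace_go_single c l.length l [] le_rfl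

lemma pv_fold_replace (l : List Char) :
    pvSpacesA.foldl (fun acc sp => PySem.Chars.replace acc [sp] []) l
      = l.filter (fun c => !pvSpacesB.contains c) := by
  simp only [pvSpacesA, List.foldl, pv_replace_single, List.filter_filter]
  apply List.filter_congr
  intro a _
  by_cases h1 : a = ' ' <;> by_cases h2 : a = '\n' <;> by_cases h3 : a = '\r' <;>
    simp [h1, h2, h3, pvSpacesB]

-- suffix-based reformulation of A's loop
def pvAux : List Char → Nat → Nat
  | _, 0 => 0
  | [], _ + 1 => 0
  | c :: cs, k + 1 => 1 + pvAux cs (if pvSpacesB.contains c then k + 1 else k)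

lemma pv_loopA_eq (t : List Char) (n i idx : Nat) :
    pvLoopA t n i idx = idx + pvAux (t.drop idx) (n - i) := by
  fun_induction pvLoopA t n i idx with
  | case1 i idx h1 h2 =>
    have : t.drop idx = [] := List.drop_eq_nil_of_le h2
    obtain ⟨k, hk⟩ : ∃ k, n - i = k + 1 := ⟨n - i - 1, by omega⟩
    simp [this, hk, pvAux]
  | case2 i idx h1 h2 ih =>
    rw [show (if h : pvSpacesA.contains (t.getD idx ' ') = true then i else i + 1)
          = (if pvSpacesA.contains (t.getD idx ' ') = true then i else i + 1) from by
        split <;> simp_all] at ih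
    rw [ih]
    have hlt : idx < t.length := by omega
    have hdrop : t.drop idx = t[idx] :: t.drop (idx + 1) :=
      List.drop_eq_getElem_cons hlt
    have hget : t.getD idx ' ' = t[idx] := List.getD_eq_getElem t ' ' hlt
    obtain ⟨k, hk⟩ : ∃ k, n - i = k + 1 := ⟨n - i - 1, by omega⟩
    rw [hdrop, hk, hget]
    by_cases hc : pvSpacesB.contains t[idx]
    · have : pvSpacesA.contains t[idx] = true := by
        simpa [pvSpacesA, pvSpacesB] using hc
      rw [if_pos this, hk]
      simp only [pvAux, hc, if_pos]
      omega
    · have : ¬ pvSpacesA.contains t[idx] = true := by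
        simpa [pvSpacesA, pvSpacesB] using hc
      rw [if_neg this]
      have hk2 : n - (i + 1) = k := by omega
      simp only [pvAux, hc, Bool.false_eq_true, ite_false, hk2]
      omega
  | case3 i idx h1 =>
    have : n - i = 0 := by omega
    simp [this, pvAux]

lemma pv_aux_pos : ∀ (t : List Char) (k : Nat) (s : Int), 1 ≤ k →
    (s + (pvAux t k : Int)) =
      (if k ≤ (((PySem.List.enumerate t s).filter (fun p => !pvSpacesB.contains p.2)).map (·.1)).length
       then (((PySem.List.enumerate t s).filter (fun p => !pvSpacesB.contains p.2)).map (·.1)).getD (k - 1) 0 + 1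
       else s + t.length) := by
  intro t
  induction t with
  | nil =>
    intro k s hk
    obtain ⟨k', rfl⟩ : ∃ k', k = k' + 1 := ⟨k - 1, by omega⟩
    simp [PySem.List.enumerate_nil, pvAux]
  | cons c cs ih =>
    intro k s hk
    obtain ⟨k', rfl⟩ : ∃ k', k = k' + 1 := ⟨k - 1, by omega⟩
    rw [PySem.List.enumerate_cons]
    by_cases hc : pvSpacesB.contains c
    · simp only [List.filter_cons, hc, Bool.not_true, Bool.false_eq_true, ite_false]
      have haux : pvAux (c :: cs) (k' + 1) = 1 + pvAux cs (k' + 1) := by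
        simp only [pvAux]; rw [if_pos hc]
      rw [haux]
      have h2 : s + ((1 + pvAux cs (k' + 1) : Nat) : Int)
          = (s + 1) + (pvAux cs (k' + 1) : Int) := by push_cast; ring
      rw [h2, ih (k' + 1) (s + 1) (by omega)]
      split
      · rfl
      · simp only [List.length_cons]; push_cast; ring
    · simp only [List.filter_cons, hc, Bool.not_false, ite_true, List.map_cons]
      have haux : pvAux (c :: cs) (k' + 1) = 1 + pvAux cs k' := by
        simp only [pvAux]; rw [if_neg hc]
      rw [haux]
      rcases Nat.eq_zero_or_pos k' with hk0 | hk1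
      · subst hk0
        simp [pvAux]
      · obtain ⟨k'', rfl⟩ : ∃ k'', k' = k'' + 1 := ⟨k' - 1, by omega⟩
        have h2 : s + ((1 + pvAux cs (k'' + 1) : Nat) : Int)
            = (s + 1) + (pvAux cs (k'' + 1) : Int) := by push_cast; ring
        rw [h2, ih (k'' + 1) (s + 1) (by omega)]
        simp only [List.length_cons, List.getD_cons_succ, Nat.add_sub_cancel,
          List.length_map]
        split
        · split
          · rfl
          · omega
        · split
          · omega
          · push_cast; ring

lemma pv_dropWhile_head {p : Char → Bool} : ∀ (l : List Char) {c : Char} {r : List Char},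
    l.dropWhile p = c :: r → p c = false := by
  intro l
  induction l with
  | nil => intro c r h; simp at h
  | cons a t ih =>
    intro c r h
    by_cases hp : p a
    · rw [List.dropWhile_cons_of_pos hp] at h
      exact ih h
    · rw [List.dropWhile_cons_of_neg hp] at h
      cases h
      simpa using hp

-- first char of a nonempty strip is not a space, hence at least one non-space char survives
lemma pv_strip_count_pos (l : List Char) (h : PySem.Chars.strip l ≠ []) :
    1 ≤ ((PySem.Chars.strip l).filter (fun c => !pvSpacesB.contains c)).length := by
  obtain ⟨c, r, hcr⟩ := List.exists_cons_of_ne_nil h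
  have hpre : PySem.Chars.strip l <+: PySem.Chars.lstrip l := by
    have hs := List.dropWhile_suffix (l := (PySem.Chars.lstrip l).reverse)
      (p := PySem.Chars.isspace)
    have := hs.reverse
    rw [List.reverse_reverse] at this
    simpa [PySem.Chars.strip, PySem.Chars.rstrip] using this
  obtain ⟨t, ht⟩ := hpre
  rw [hcr] at ht
  have hdw : l.dropWhile PySem.Chars.isspace = c :: (r ++ t) := by
    have h2 : PySem.Chars.lstrip l = c :: (r ++ t) := by rw [← ht]; simp
    simpa [PySem.Chars.lstrip] using h2
  have hns : PySem.Chars.isspace c = false := pv_dropWhile_head l hdw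
  have hcsp : pvSpacesB.contains c = false := by
    cases hmem : pvSpacesB.contains c
    · rfl
    · exfalso
      have : c = ' ' ∨ c = '\n' ∨ c = '\r' := by
        simpa [pvSpacesB] using hmem
      rcases this with rfl | rfl | rfl <;> simp [PySem.Chars.isspace] at hns
  have hmem2 : c ∈ (PySem.Chars.strip l).filter (fun c => !pvSpacesB.contains c) := by
    rw [hcr]
    have hnm : c ∉ pvSpacesB := by simpa using hcsp
    simp [hnm]
  exact List.length_pos_of_mem hmem2

-- ===== VERDICT (by name: the statement is the Claim_ definition above) =====
theorem extract_end_spec : Claim_equal_extract_end := by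
  intro text sql _
  unfold Spec_extract_end extract_end extract_end_alt
  simp only []
  by_cases hg : PySem.Str.len (PySem.Str.strip sql) = 0
  · rw [if_pos hg, if_pos hg]
  · rw [if_neg hg, if_neg hg]
    rw [pv_fold_replace]
    have hne : PySem.Chars.strip sql.toList ≠ [] := by
      intro hnil
      apply hg
      rw [PySem.Str.len_eq, PySem.Str.toList_strip, hnil]
      rfl
    have hn : 1 ≤ (((PySem.Str.strip sql).toList).filter
        (fun c => !pvSpacesB.contains c)).length := by
      rw [PySem.Str.toList_strip]; exact pv_strip_count_pos sql.toList hne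
    rw [pv_loopA_eq]
    have hap := pv_aux_pos text.toList
      ((((PySem.Str.strip sql).toList).filter (fun c => !pvSpacesB.contains c)).length) 0 hn
    simp only [zero_add] at hap
    simp only [List.drop_zero, Nat.sub_zero, Nat.zero_add]
    rw [hap]
    by_cases hcond : (((PySem.Str.strip sql).toList).filter
          (fun c => !pvSpacesB.contains c)).length ≤
        (((PySem.List.enumerate text.toList 0).filter
          (fun p => !pvSpacesB.contains p.2)).map (·.1)).length
    · rw [if_pos hcond, if_pos hcond]
      ring
    · rw [if_neg hcond, if_neg hcond]
      rw [PySem.Str.len_eq]
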